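-- pv_equiv track=rewrite | github.com/jimbarrett27/telegram_bot | dnd/pdf_parser.py | _elements_to_sections
-- ===== SOURCE A (Python) =====
-- def _elements_to_sections(elements: list[dict]) -> list[dict]:
--     """Convert a list of heading/text elements into sections.
--
--     Returns list of {"title": str, "content": str} dicts.
--     """
--     sections = []
--     current_title = None
--     current_content = []
--
--     for elem in elements:
--         if elem["type"] == "heading":
--             # Save previous section
--             if current_title is not None or current_content:
--                 sections.append({
--                     "title": current_title or "Introduction",
--                     "content": "\n".join(current_content).strip(),
--                 })
--             current_title = elem["content"]
--             current_content = []
--         else: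
--             current_content.append(elem["content"])
--
--     # Save final section
--     if current_title is not None or current_content:
--         sections.append({
--             "title": current_title or "Introduction",
--             "content": "\n".join(current_content).strip(),
--         })
--
--     # Filter out empty sections
--     sections = [s for s in sections if s["content"]]
--
--     return sections
-- ===== SOURCE B (Python) =====
-- def _elements_to_sections(elements: list[dict]) -> list[dict]:
--     """Index-scan decomposition: for each maximal run of text elements
--     (the run before the first heading, then the run after each heading),
--     emit one section directly if its stripped joined content is non-empty.
--     No section list is flushed/re-filtered and no accumulator state is
--     carried across runs."""
--     out = []
--     title = None
--     i = 0
--     n = len(elements)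
--     while True:
--         j = i
--         while j < n and elements[j]["type"] != "heading":
--             j += 1
--         content = "\n".join(elements[k]["content"] for k in range(i, j)).strip()
--         if content:
--             out.append({"title": title or "Introduction", "content": content})
--         if j == n:
--             return out
--         title = elements[j]["content"]
--         i = j + 1
-- ===== Notes on version B (the rewrite author's own statement) =====
-- stated objective: alternative
-- what changed: Replaces A's stateful flush-then-refilter accumulator (pending title/content flushed at each heading and at the end, then a filtering pass over the section list) with a direct run-scan that advances over each maximal run of text elements and emits its section immediately iff the stripped joined content is non-empty, with no flush conditions and no post-filter pass; Pre_ only excludes elements missing a "type" or "content" key, where both programs raise KeyError.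
import Mathlib
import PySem

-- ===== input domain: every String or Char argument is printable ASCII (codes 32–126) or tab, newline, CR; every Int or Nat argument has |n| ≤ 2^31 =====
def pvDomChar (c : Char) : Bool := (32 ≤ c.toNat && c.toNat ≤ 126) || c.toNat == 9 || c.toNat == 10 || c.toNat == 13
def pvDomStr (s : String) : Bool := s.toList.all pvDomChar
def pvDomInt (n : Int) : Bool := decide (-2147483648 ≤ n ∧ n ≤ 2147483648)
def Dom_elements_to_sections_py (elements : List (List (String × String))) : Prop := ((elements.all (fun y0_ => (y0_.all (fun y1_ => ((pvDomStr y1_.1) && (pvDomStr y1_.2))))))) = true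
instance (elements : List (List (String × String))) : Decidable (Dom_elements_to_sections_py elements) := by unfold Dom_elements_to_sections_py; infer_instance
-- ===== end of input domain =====

-- B replaces A's flush-at-heading accumulator plus final filtering pass by a direct scan
-- over maximal runs of text elements that emits each non-empty section immediately (objective: alternative).

-- shared accessors: elem[k] ported via the PySem.Dict lookup (KeyError = get? none, excluded by Pre_; getD is exact under Pre_)
def pvGetD (e : List (String × String)) (k : String) : String := PySem.Dict.getD (PySem.Dict.mk e) k ""
-- "\n".join(cs).strip()
def pvS (cs : List String) : String := PySem.Str.strip (PySem.Str.join "\n" cs)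
-- current_title or "Introduction"  (Python or: None and "" are falsy)
def pvTitle (t : Option String) : String :=
  match t with
  | none => "Introduction"
  | some s => if s = "" then "Introduction" else s
def pvSec (t : Option String) (c : String) : List (String × String) := [("title", pvTitle t), ("content", c)]

-- ===== PORT A =====
-- loop body: state = (sections, current_title, current_content)
def aStep (st : List (List (String × String)) × Option String × List String)
    (elem : List (String × String)) : List (List (String × String)) × Option String × List String :=
  if pvGetD elem "type" = "heading" then
    ((if st.2.1.isSome ∨ st.2.2 ≠ [] then st.1 ++ [pvSec st.2.1 (pvS st.2.2)] else st.1),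
     some (pvGetD elem "content"), [])
  else
    (st.1, st.2.1, st.2.2 ++ [pvGetD elem "content"])

def elements_to_sections_py (elements : List (List (String × String))) : List (List (String × String)) :=
  let st := elements.foldl aStep ([], none, [])
  -- save final section
  let sections := if st.2.1.isSome ∨ st.2.2 ≠ [] then st.1 ++ [pvSec st.2.1 (pvS st.2.2)] else st.1
  -- filter out empty sections (truthiness of s["content"])
  sections.filter (fun s => !(pvGetD s "content" == ""))

-- ===== PORT B =====
def pvIsText (e : List (String × String)) : Bool := !(pvGetD e "type" == "heading")

-- the while-loop of Source B: rest = elements[i:]; the inner index scan over the run of text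
-- elements is the takeWhile/dropWhile split; out is Source B's accumulator
def altGo (out : List (List (String × String))) (title : Option String)
    (rest : List (List (String × String))) : List (List (String × String)) :=
  let content := pvS ((rest.takeWhile pvIsText).map (fun e => pvGetD e "content"))
  let out' := if content = "" then out else out ++ [pvSec title content]
  match h : rest.dropWhile pvIsText with
  | [] => out'
  | e :: tl => altGo out' (some (pvGetD e "content")) tl
termination_by rest.length
decreasing_by
  have hle := List.length_dropWhile_le (p := pvIsText) rest
  rw [h] at hle
  simp at hle
  omega

def elements_to_sections_py_alt (elements : List (List (String × String))) : List (List (String × String)) :=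
  altGo [] none elements

-- ===== PRECONDITION & SPEC =====
-- Pre_ excludes exactly the inputs where A raises KeyError: some element lacks a "type" or "content" key.
def Pre_elements_to_sections_py (elements : List (List (String × String))) : Prop :=
  ∀ e ∈ elements, ((PySem.Dict.mk e).get? "type").isSome = true ∧ ((PySem.Dict.mk e).get? "content").isSome = true
instance (elements : List (List (String × String))) : Decidable (Pre_elements_to_sections_py elements) := by
  unfold Pre_elements_to_sections_py; infer_instance

def pvWitness_elements_to_sections_py : (List (List (String × String))) :=
  [[("type", "text"), ("content", "before")],
   [("type", "heading"), ("content", "Part 1")],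
   [("type", "text"), ("content", " body ")]]

def Spec_elements_to_sections_py (elements : List (List (String × String))) (out : List (List (String × String))) : Prop := out = elements_to_sections_py_alt elements
instance (elements : List (List (String × String))) (out : List (List (String × String))) : Decidable (Spec_elements_to_sections_py elements out) := by unfold Spec_elements_to_sections_py; infer_instance

-- ===== CLAIM (what is proved, stated in full; the proofs are below) =====
def Claim_equal_elements_to_sections_py : Prop := ∀ (elements : List (List (String × String))), Dom_elements_to_sections_py elements → Pre_elements_to_sections_py elements → Spec_elements_to_sections_py elements (elements_to_sections_py elements)

-- ===== LEMMAS AND PROOFS =====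

-- the section A's pending state (ct, cc) contributes after the final filter
def pvEmit (ct : Option String) (cc : List String) : List (List (String × String)) :=
  if pvS cc = "" then [] else [pvSec ct (pvS cc)]

def pvP (s : List (String × String)) : Bool := !(pvGetD s "content" == "")

-- common functional spec: pending title ct, pending text contents cc, remaining elements l
def goFrom (ct : Option String) (cc : List String) :
    List (List (String × String)) → List (List (String × String))
  | [] => pvEmit ct cc
  | e :: tl =>
    if pvIsText e then goFrom ct (cc ++ [pvGetD e "content"]) tl
    else pvEmit ct cc ++ goFrom (some (pvGetD e "content")) [] tl

lemma pvP_sec (ct : Option String) (c : String) : pvP (pvSec ct c) = !(c == "") := by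
  simp [pvP, pvSec, pvGetD, PySem.Dict.getD, PySem.Dict.get?_mk_cons]

lemma pvS_nil : pvS [] = "" := by rfl

set_option maxHeartbeats 1000000 in
lemma filter_flush (secs : List (List (String × String))) (ct : Option String) (cc : List String) :
    (if ct.isSome ∨ cc ≠ [] then secs ++ [pvSec ct (pvS cc)] else secs).filter pvP
      = secs.filter pvP ++ pvEmit ct cc := by
  split_ifs with h
  · rw [List.filter_append]
    congr 1
    by_cases hc : pvS cc = "" <;> simp [pvEmit, pvP_sec, hc]
  · simp only [not_or, ne_eq, not_not] at h
    obtain ⟨h1, h2⟩ := h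
    simp [pvEmit, h2, pvS_nil]

lemma A_loop (l : List (List (String × String))) :
    ∀ (secs : List (List (String × String))) (ct : Option String) (cc : List String),
    (let st := l.foldl aStep (secs, ct, cc)
     (if st.2.1.isSome ∨ st.2.2 ≠ [] then st.1 ++ [pvSec st.2.1 (pvS st.2.2)] else st.1).filter pvP)
      = secs.filter pvP ++ goFrom ct cc l := by
  induction l with
  | nil =>
    intro secs ct cc
    simpa [goFrom] using filter_flush secs ct cc
  | cons e l ih =>
    intro secs ct cc
    by_cases he : pvIsText e = true
    · have hne : ¬ pvGetD e "type" = "heading" := by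
        simpa [pvIsText] using he
      simp only [goFrom, he, if_pos]
      simpa [List.foldl_cons, aStep, hne] using ih secs ct (cc ++ [pvGetD e "content"])
    · have heq : pvGetD e "type" = "heading" := by
        simpa [pvIsText] using he
      simp only [goFrom, he, if_neg, Bool.not_eq_true] at *
      have := ih (if ct.isSome ∨ cc ≠ [] then secs ++ [pvSec ct (pvS cc)] else secs)
        (some (pvGetD e "content")) []
      rw [filter_flush secs ct cc] at this
      simpa [List.foldl_cons, aStep, heq, he, goFrom, List.append_assoc] using this

-- a run of text elements is absorbed into the pending contents
lemma goFrom_run (t : List (List (String × String))) :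
    ∀ (ct : Option String) (cc : List String) (d : List (List (String × String))),
    (∀ e ∈ t, pvIsText e = true) →
    goFrom ct cc (t ++ d) = goFrom ct (cc ++ t.map (fun e => pvGetD e "content")) d := by
  induction t with
  | nil => intro ct cc d _; simp
  | cons e t ih =>
    intro ct cc d ht
    have he : pvIsText e = true := ht e List.mem_cons_self
    simp only [List.cons_append, goFrom, he, if_pos]
    rw [ih ct (cc ++ [pvGetD e "content"]) d (fun x hx => ht x (List.mem_cons_of_mem e hx))]
    simp [List.append_assoc]

lemma goFrom_split (ct : Option String) (l : List (List (String × String))) :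
    goFrom ct [] l
      = goFrom ct ((l.takeWhile pvIsText).map (fun e => pvGetD e "content")) (l.dropWhile pvIsText) := by
  conv_lhs => rw [← List.takeWhile_append_dropWhile (p := pvIsText) (l := l)]
  rw [goFrom_run _ ct [] _ (fun e he => List.mem_takeWhile_imp he)]
  simp

lemma altGo_eq (n : Nat) :
    ∀ (l : List (List (String × String))), l.length ≤ n →
    ∀ (out : List (List (String × String))) (ct : Option String),
    altGo out ct l = out ++ goFrom ct [] l := by
  induction n with
  | zero =>
    intro l hl out ct
    have : l = [] := List.length_eq_zero_iff.mp (Nat.le_zero.mp hl)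
    subst this
    rw [altGo]
    simp [goFrom, pvEmit, pvS_nil]
  | succ n ih =>
    intro l hl out ct
    rw [altGo, goFrom_split ct l]
    have hle := List.length_dropWhile_le (p := pvIsText) l
    cases h : l.dropWhile pvIsText with
    | nil =>
      dsimp only
      simp only [goFrom]
      split_ifs with hc <;> simp [pvEmit, hc]
    | cons e tl =>
      dsimp only
      rw [h] at hle
      have htl : tl.length ≤ n := by simp at hle; omega
      have he : pvIsText e = false := by
        have h0 := List.dropWhile_get_zero_not (p := pvIsText) l (by rw [h]; simp)
        simpa [h] using h0
      rw [ih tl htl]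
      have hg : goFrom ct ((l.takeWhile pvIsText).map (fun e => pvGetD e "content")) (e :: tl)
          = pvEmit ct ((l.takeWhile pvIsText).map (fun e => pvGetD e "content"))
            ++ goFrom (some (pvGetD e "content")) [] tl := by
        simp [goFrom, he]
      rw [hg]
      simp only [pvEmit]
      split_ifs with hc <;> simp [List.append_assoc]

theorem main_eq (elements : List (List (String × String))) :
    elements_to_sections_py elements = elements_to_sections_py_alt elements := by
  have hA := A_loop elements [] none []
  simp only [List.filter_nil, List.nil_append] at hA
  have hB := altGo_eq elements.length elements (Nat.le_refl _) [] none
  simp only [List.nil_append] at hB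
  show (elements_to_sections_py elements) = _
  unfold elements_to_sections_py elements_to_sections_py_alt
  rw [hB]
  have hP : (fun s => !(pvGetD s "content" == "")) = pvP := rfl
  simp only [hP]
  exact hA

-- ===== VERDICT (by name: the statement is the Claim_ definition above) =====
theorem elements_to_sections_py_spec : Claim_equal_elements_to_sections_py := by
  intro elements _ _
  unfold Spec_elements_to_sections_py
  exact main_eq elements
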